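-- pv_equiv track=rewrite | github.com/VickyDev810/bitbox-hackathon | Layer8-service/api_service/main.py | get_placeholder_mapping_from_dict
-- ===== SOURCE A (Python) =====
-- from typing import Dict, List, Optional, Union, Annotated
--
-- def get_placeholder_mapping_from_dict(mapping: Dict[str, str]) -> Dict[str, List[Dict[str, str]]]:
--     """
--     Convert a simple placeholder mapping dictionary to the format expected by the API response.
--
--     Args:
--         mapping: Dictionary with placeholders as keys and original values as values
--
--     Returns:
--         Dictionary with category as key and list of placeholder mapping objects as values
--     """
--     result = {}
--     for placeholder, original in mapping.items():
--         # Extract category from placeholder (format: ___CATEGORY_UUID___)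
--         parts = placeholder.strip('_').split('_')
--         if len(parts) >= 2:
--             category = parts[0].lower()
--             if category not in result:
--                 result[category] = []
--             result[category].append({
--                 "placeholder": placeholder,
--                 "original_value": original
--             })
--     return result
-- ===== SOURCE B (Python) =====
-- def get_placeholder_mapping_from_dict(mapping):
--     # One tagging pass, then an index-first grouping: distinct categories in
--     # first-appearance order, each paired with a filter over the tagged list.
--     tagged = []
--     for placeholder, original in mapping.items():
--         parts = placeholder.strip('_').split('_')
--         if len(parts) >= 2:
--             tagged.append((parts[0].lower(), placeholder, original))
--     categories = list(dict.fromkeys(cat for cat, _, _ in tagged))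
--     return {cat: [{"placeholder": p, "original_value": o}
--                   for c, p, o in tagged if c == cat]
--             for cat in categories}
-- ===== Notes on version B (the rewrite author's own statement) =====
-- stated objective: alternative
-- what changed: Replaces A's single streaming pass that appends into a result dict (create-key-then-append) by a tagging pass that builds a filtered (category, placeholder, original) list, then derives the distinct categories in first-appearance order and builds each group with one filter over the tagged list.
import Mathlib
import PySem

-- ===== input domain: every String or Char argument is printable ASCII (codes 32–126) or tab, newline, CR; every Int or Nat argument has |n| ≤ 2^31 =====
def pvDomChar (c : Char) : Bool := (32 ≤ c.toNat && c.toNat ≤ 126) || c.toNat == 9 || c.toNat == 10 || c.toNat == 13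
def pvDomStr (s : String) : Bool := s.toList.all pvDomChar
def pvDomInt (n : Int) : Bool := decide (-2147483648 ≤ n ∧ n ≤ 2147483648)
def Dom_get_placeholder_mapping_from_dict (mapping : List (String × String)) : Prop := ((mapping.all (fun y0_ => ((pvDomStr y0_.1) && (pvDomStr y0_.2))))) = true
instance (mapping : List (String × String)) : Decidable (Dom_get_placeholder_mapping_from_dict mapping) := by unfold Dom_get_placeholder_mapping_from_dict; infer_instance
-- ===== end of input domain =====

-- B replaces A's streaming dict-append grouping by a tagging pass plus an
-- index-first grouping (first-occurrence categories, then one filter per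
-- category); objective: alternative decomposition, not speed.

-- parts = placeholder.strip('_').split('_') — shared literal subexpression of both sources
def pvParts (p : String) : List String :=
  (PySem.Str.split? (PySem.Str.stripChars p "_") "_").getD []

def pvEntry (p o : String) : List (String × String) :=
  [("placeholder", p), ("original_value", o)]

-- ===== PORT A =====
def get_placeholder_mapping_from_dict (mapping : List (String × String)) : List (String × List (List (String × String))) :=
  (mapping.foldl (fun result pr =>
      let parts := pvParts pr.1
      if 2 ≤ parts.length then
        let category := PySem.Str.lower (parts.getD 0 "")
        let result := if result.contains category then result
                      else result.insert category []
        result.insert category (result.getD category [] ++ [pvEntry pr.1 pr.2])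
      else result)
    PySem.Dict.empty).items

-- ===== PORT B =====
def get_placeholder_mapping_from_dict_alt (mapping : List (String × String)) : List (String × List (List (String × String))) :=
  let tagged := mapping.foldl (fun acc pr =>
      let parts := pvParts pr.1
      if 2 ≤ parts.length then
        acc ++ [(PySem.Str.lower (parts.getD 0 ""), pr.1, pr.2)]
      else acc) []
  let categories : PySem.Set String := PySem.Set.ofList (tagged.map (fun t => t.1))
  categories.map (fun cat =>
    (cat, (tagged.filter (fun t => t.1 == cat)).map (fun t => pvEntry t.2.1 t.2.2)))

-- ===== PRECONDITION & SPEC =====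
def Spec_get_placeholder_mapping_from_dict (mapping : List (String × String)) (out : List (String × List (List (String × String)))) : Prop := out = get_placeholder_mapping_from_dict_alt mapping
instance (mapping : List (String × String)) (out : List (String × List (List (String × String)))) : Decidable (Spec_get_placeholder_mapping_from_dict mapping out) := by unfold Spec_get_placeholder_mapping_from_dict; infer_instance

-- ===== CLAIM (what is proved, stated in full; the proofs are below) =====
def Claim_equal_get_placeholder_mapping_from_dict : Prop := ∀ (mapping : List (String × String)), Dom_get_placeholder_mapping_from_dict mapping → Spec_get_placeholder_mapping_from_dict mapping (get_placeholder_mapping_from_dict mapping)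

-- ===== LEMMAS AND PROOFS =====

-- the tagged triple B builds for an admitted pair
def pvTag (pr : String × String) : String × String × String :=
  (PySem.Str.lower ((pvParts pr.1).getD 0 ""), pr.1, pr.2)

def pvTags (m : List (String × String)) : List (String × String × String) :=
  (m.filter (fun pr => decide (2 ≤ (pvParts pr.1).length))).map pvTag

-- entries of one category, in order
def pvEnts (c : String) (ts : List (String × String × String)) : List (List (String × String)) :=
  (ts.filter (fun t => t.1 == c)).map (fun t => pvEntry t.2.1 t.2.2)

-- A's loop body after the filter, on tagged triples
def pvGStep (d : PySem.Dict String (List (List (String × String)))) (t : String × String × String) : PySem.Dict String (List (List (String × String))) :=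
  let d := if d.contains t.1 then d else d.insert t.1 []
  d.insert t.1 (d.getD t.1 [] ++ [pvEntry t.2.1 t.2.2])

-- the new categories (not in ks) in first-occurrence order, with their groups
def pvNews (ks : List String) : List (String × String × String) → List (String × List (List (String × String)))
  | [] => []
  | t :: ts =>
      if ks.contains t.1 then pvNews ks ts
      else (t.1, pvEnts t.1 (t :: ts)) :: pvNews (ks ++ [t.1]) ts

-- first-occurrence dedup of l relative to ks
def pvDD (ks : List String) : List String → List String
  | [] => []
  | c :: l => if ks.contains c then pvDD ks l else c :: pvDD (ks ++ [c]) l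

theorem pvTags_spec (m : List (String × String)) (acc : List (String × String × String)) :
    m.foldl (fun acc pr =>
      let parts := pvParts pr.1
      if 2 ≤ parts.length then
        acc ++ [(PySem.Str.lower (parts.getD 0 ""), pr.1, pr.2)]
      else acc) acc = acc ++ pvTags m := by
  induction m generalizing acc with
  | nil => simp [pvTags]
  | cons pr m ih =>
      rw [List.foldl_cons, ih]
      by_cases h : 2 ≤ (pvParts pr.1).length
      · simp [pvTags, pvTag, h]
      · simp [pvTags, h]

theorem pvAfold_eq (m : List (String × String)) (d : PySem.Dict String (List (List (String × String)))) :
    m.foldl (fun result pr =>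
      let parts := pvParts pr.1
      if 2 ≤ parts.length then
        let category := PySem.Str.lower (parts.getD 0 "")
        let result := if result.contains category then result
                      else result.insert category []
        result.insert category (result.getD category [] ++ [pvEntry pr.1 pr.2])
      else result) d
    = (pvTags m).foldl pvGStep d := by
  induction m generalizing d with
  | nil => simp [pvTags]
  | cons pr m ih =>
      rw [List.foldl_cons, ih]
      by_cases h : 2 ≤ (pvParts pr.1).length
      · rw [show pvTags (pr :: m) = pvTag pr :: pvTags m from by simp [pvTags, pvTag, h],
          List.foldl_cons]
        refine congrArg (fun x => List.foldl pvGStep x (pvTags m)) ?_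
        simp only [pvGStep, pvTag, h, if_true]
      · rw [show pvTags (pr :: m) = pvTags m from by simp [pvTags, h]]
        refine congrArg (fun x => List.foldl pvGStep x (pvTags m)) ?_
        simp [h]

theorem pvEnts_cons (c : String) (t : String × String × String) (ts : List (String × String × String)) :
    pvEnts c (t :: ts) = (if t.1 == c then [pvEntry t.2.1 t.2.2] else []) ++ pvEnts c ts := by
  by_cases h : t.1 == c <;> simp [pvEnts, h]

theorem pvKeys_contains (d : PySem.Dict String (List (List (String × String)))) (k : String) :
    d.keys.contains k = d.contains k := by
  simp only [PySem.Dict.keys, PySem.Dict.contains]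
  induction d.items with
  | nil => rfl
  | cons p l ih =>
      simp only [List.map_cons, List.contains_cons, List.any_cons, ih]
      by_cases hk : k = p.1
      · simp [hk]
      · have h1 : (k == p.1) = false := by simpa using hk
        have h2 : (p.1 == k) = false := by simpa using (Ne.symm hk)
        rw [h1, h2]

theorem pvGStep_keys_nodup (d : PySem.Dict String (List (List (String × String)))) (t : String × String × String) (hnd : d.keys.Nodup) : (pvGStep d t).keys.Nodup := by
  unfold pvGStep
  by_cases hc : d.contains t.1 <;>
    simp only [hc, if_true, Bool.false_eq_true, if_false] <;>
    exact PySem.Dict.nodup_keys_insert _ _ _ (by first | exact hnd | exact PySem.Dict.nodup_keys_insert _ _ _ hnd)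

theorem pvMain (ts : List (String × String × String)) (d : PySem.Dict String (List (List (String × String)))) (hnd : d.keys.Nodup) :
    (ts.foldl pvGStep d).items
      = d.items.map (fun kv => (kv.1, kv.2 ++ pvEnts kv.1 ts)) ++ pvNews d.keys ts := by
  induction ts generalizing d with
  | nil => simp [pvNews, pvEnts]
  | cons t ts ih =>
      rw [List.foldl_cons, ih _ (pvGStep_keys_nodup d t hnd)]
      by_cases hc : d.contains t.1
      · have hitems : (pvGStep d t).items
            = d.items.map (fun p => if p.1 == t.1 then (t.1, d.getD t.1 [] ++ [pvEntry t.2.1 t.2.2]) else p) := by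
          unfold pvGStep
          simp only [hc, if_true]
          exact PySem.Dict.items_insert_of_contains d _ hc
        have hkeys : (pvGStep d t).keys = d.keys := by
          unfold pvGStep
          simp only [hc, if_true]
          exact PySem.Dict.keys_insert_of_contains d _ hc
        have hnews : pvNews d.keys (t :: ts) = pvNews d.keys ts := by
          rw [pvNews, pvKeys_contains, hc]
          simp
        rw [hitems, hkeys, hnews, List.map_map]
        congr 1
        apply List.map_congr_left
        intro kv hkv
        by_cases hk : kv.1 == t.1
        · have hk' : kv.1 = t.1 := by simpa using hk
          have hv : d.getD t.1 [] = kv.2 := by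
            refine PySem.Dict.getD_of_mem_items d ?_ hnd []
            rw [← hk']; exact hkv
          simp [Function.comp, hk', hv, pvEnts_cons, List.append_assoc]
        · have hne : kv.1 ≠ t.1 := by simpa using hk
          have hk2 : (t.1 == kv.1) = false := by simpa using (Ne.symm hne)
          simp [Function.comp, hk, pvEnts_cons, hk2]
      · have hfresh : ∀ kv ∈ d.items, (kv.1 == t.1) = false := by
          intro kv hkv
          have hne : kv.1 ≠ t.1 := by
            intro e
            apply hc
            unfold PySem.Dict.contains
            exact List.any_eq_true.mpr ⟨kv, hkv, by simp [e]⟩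
          simpa using hne
        have hc' : d.contains t.1 = false := by simpa using hc
        have hitems : (pvGStep d t).items = d.items ++ [(t.1, [pvEntry t.2.1 t.2.2])] := by
          unfold pvGStep
          simp only [hc, Bool.false_eq_true, if_false]
          rw [PySem.Dict.items_insert_of_contains _ _ (PySem.Dict.contains_insert_self d t.1 [])]
          rw [PySem.Dict.getD_insert_self, PySem.Dict.items_insert_of_not_contains d _ hc']
          rw [List.map_append]
          have hid : List.map (fun p => if p.1 == t.1 then (t.1, [] ++ [pvEntry t.2.1 t.2.2]) else p) d.items
              = List.map id d.items :=
            List.map_congr_left (fun kv hkv => by simp [hfresh kv hkv])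
          rw [hid, List.map_id]
          simp
        have hkeys : (pvGStep d t).keys = d.keys ++ [t.1] := by
          unfold pvGStep
          simp only [hc, Bool.false_eq_true, if_false]
          rw [PySem.Dict.keys_insert_of_contains _ _ (PySem.Dict.contains_insert_self d t.1 [])]
          exact PySem.Dict.keys_insert_of_not_contains d _ hc'
        have hnews : pvNews d.keys (t :: ts) = (t.1, pvEnts t.1 (t :: ts)) :: pvNews (d.keys ++ [t.1]) ts := by
          rw [pvNews, pvKeys_contains, hc']
          simp
        rw [hitems, hkeys, hnews, List.map_append]
        simp only [List.map_cons, List.map_nil]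
        rw [List.append_assoc]
        congr 1
        · apply List.map_congr_left
          intro kv hkv
          have hne : kv.1 ≠ t.1 := by simpa using hfresh kv hkv
          have hk2 : (t.1 == kv.1) = false := by simpa using (Ne.symm hne)
          rw [pvEnts_cons, hk2]
          simp
        · rw [pvEnts_cons]
          simp

theorem pvDD_fresh (l ks : List String) (c : String) :
    c ∈ pvDD ks l → ks.contains c = false := by
  induction l generalizing ks with
  | nil => intro h; simp [pvDD] at h
  | cons c' l ih =>
      intro h
      rw [pvDD] at h
      by_cases hk : ks.contains c'
      · rw [hk] at h
        simp only [if_true] at h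
        exact ih ks h
      · have hk' : ks.contains c' = false := by simpa using hk
        rw [hk'] at h
        simp only [Bool.false_eq_true, if_false, List.mem_cons] at h
        rcases h with rfl | h
        · exact hk'
        · have := ih (ks ++ [c']) h
          simp only [List.contains_append, Bool.or_eq_false_iff] at this
          exact this.1

theorem pvNews_eq_dd (ts : List (String × String × String)) (ks : List String) :
    pvNews ks ts = (pvDD ks (ts.map (fun t => t.1))).map (fun c => (c, pvEnts c ts)) := by
  induction ts generalizing ks with
  | nil => simp [pvNews, pvDD]
  | cons t ts ih =>
      rw [pvNews, List.map_cons, pvDD]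
      by_cases h : ks.contains t.1
      · simp only [h, if_true]
        rw [ih ks]
        apply List.map_congr_left
        intro c hc
        have hfr := pvDD_fresh _ _ _ hc
        have hcne : c ≠ t.1 := fun e => by rw [e] at hfr; rw [hfr] at h; simp at h
        have hne : (t.1 == c) = false := by simpa using (Ne.symm hcne)
        rw [pvEnts_cons, hne]
        simp
      · have h' : ks.contains t.1 = false := by simpa using h
        simp only [h', Bool.false_eq_true, if_false, List.map_cons]
        congr 1
        rw [ih (ks ++ [t.1])]
        apply List.map_congr_left
        intro c hc
        have hfr := pvDD_fresh _ _ _ hc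
        simp only [List.contains_append, Bool.or_eq_false_iff] at hfr
        have hcne : c ≠ t.1 := by
          have := hfr.2
          simp only [List.contains_cons] at this
          intro e
          rw [e] at this
          simp at this
        have hne : (t.1 == c) = false := by simpa using (Ne.symm hcne)
        rw [pvEnts_cons, hne]
        simp

theorem pvSet_ofList_eq_dd (l ks : List String) :
    List.foldl PySem.Set.add ks l = ks ++ pvDD ks l := by
  induction l generalizing ks with
  | nil => simp [pvDD]
  | cons c l ih =>
      rw [List.foldl_cons]
      by_cases h : c ∈ ks
      · have hadd : PySem.Set.add ks c = ks := by simp [PySem.Set.add, h]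
        rw [hadd, ih, pvDD, show ks.contains c = true from by simpa using h]
        simp
      · have hadd : PySem.Set.add ks c = ks ++ [c] := by simp [PySem.Set.add, h]
        rw [hadd, ih, pvDD, show ks.contains c = false from by simpa using h]
        simp

-- ===== VERDICT (by name: the statement is the Claim_ definition above) =====
theorem get_placeholder_mapping_from_dict_spec : Claim_equal_get_placeholder_mapping_from_dict := by
  intro mapping _
  unfold Spec_get_placeholder_mapping_from_dict
  show get_placeholder_mapping_from_dict mapping
      = (PySem.Set.ofList ((mapping.foldl (fun acc pr =>
            let parts := pvParts pr.1
            if 2 ≤ parts.length then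
              acc ++ [(PySem.Str.lower (parts.getD 0 ""), pr.1, pr.2)]
            else acc) []).map (fun t => t.1))).map (fun cat =>
        (cat, ((mapping.foldl (fun acc pr =>
            let parts := pvParts pr.1
            if 2 ≤ parts.length then
              acc ++ [(PySem.Str.lower (parts.getD 0 ""), pr.1, pr.2)]
            else acc) []).filter (fun t => t.1 == cat)).map (fun t => pvEntry t.2.1 t.2.2)))
  rw [pvTags_spec, List.nil_append]
  unfold get_placeholder_mapping_from_dict
  rw [pvAfold_eq, pvMain _ _ (by simp [PySem.Dict.empty, PySem.Dict.keys])]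
  simp only [PySem.Dict.empty, List.map_nil, List.nil_append]
  rw [pvNews_eq_dd]
  rw [show PySem.Set.ofList ((pvTags mapping).map (fun t => t.1))
        = pvDD [] ((pvTags mapping).map (fun t => t.1)) from by
      rw [PySem.Set.ofList, pvSet_ofList_eq_dd]
      rfl]
  rfl
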